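-- pv_equiv track=rewrite | github.com/wilseypa/lhf | python_tests/Polytopal_Development/FinalPolytopalImplementation.py | permutahedronincidence
-- ===== SOURCE A (Python) =====
-- def swapdifferbyone(pnt1,pnt2):
-- 	cnt=0
-- 	lst = []
-- 	for i in range(0,len(pnt1)):
-- 		if(pnt1[i]!=pnt2[i]):
-- 			cnt=cnt+1
-- 			lst.append(pnt1[i])
-- 	if(cnt==2 and abs(lst[0]-lst[1])==1):
-- 		return True
-- 	else:
-- 		return False
--
-- def permutahedronincidence(points):
-- 	incidence = []
-- 	for i in range(0,len(points)):
-- 		lst = []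
-- 		for j in range(0,len(points)):
-- 			if(swapdifferbyone(points[i],points[j])):
-- 				lst.append(1)
-- 			else:
-- 				lst.append(0)
-- 		incidence.append(lst)
-- 	return incidence
-- ===== SOURCE B (Python) =====
-- def permutahedronincidence(points):
--     # Cell test: locate the first and last mismatching positions and require the
--     # interior slice to be identical (exactly-two-differences) with the two
--     # boundary values of p consecutive. No counting/collecting of differences.
--     def _lcp(p, q):
--         # length of the longest common prefix of p and q (len(p) bounds the scan)
--         k = 0
--         while k < len(p) and p[k] == q[k]:
--             k += 1
--         return k
--
--     def _cell(p, q):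
--         i = _lcp(p, q)
--         n = len(p)
--         if i == n:
--             return 0  # identical points
--         j = n - 1 - _lcp(p[::-1], q[::-1])  # last mismatching position
--         if i == j or p[i + 1:j] != q[i + 1:j] or abs(p[i] - p[j]) != 1:
--             return 0
--         return 1
--
--     # Hash-cons the points: the cell value depends only on the two points'
--     # values, so compute the table on distinct points once and expand it.
--     index = {}
--     reps = []
--     code = []
--     for p in points:
--         t = tuple(p)
--         k = index.get(t)
--         if k is None:
--             k = len(reps)
--             index[t] = k
--             reps.append(p)
--         code.append(k)
--     table = [[_cell(a, b) for b in reps] for a in reps]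
--     return [[table[a][b] for b in code] for a in code]
-- ===== Notes on version B (the rewrite author's own statement) =====
-- stated objective: alternative
-- what changed: B hash-conses the points through a dict (computing the cell table only on distinct points and expanding it through a code array), and replaces A's count-and-collect-all-differences pair test by boundary localization: first and last mismatching positions plus an interior slice-equality check and one consecutive-values test.
import Mathlib
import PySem

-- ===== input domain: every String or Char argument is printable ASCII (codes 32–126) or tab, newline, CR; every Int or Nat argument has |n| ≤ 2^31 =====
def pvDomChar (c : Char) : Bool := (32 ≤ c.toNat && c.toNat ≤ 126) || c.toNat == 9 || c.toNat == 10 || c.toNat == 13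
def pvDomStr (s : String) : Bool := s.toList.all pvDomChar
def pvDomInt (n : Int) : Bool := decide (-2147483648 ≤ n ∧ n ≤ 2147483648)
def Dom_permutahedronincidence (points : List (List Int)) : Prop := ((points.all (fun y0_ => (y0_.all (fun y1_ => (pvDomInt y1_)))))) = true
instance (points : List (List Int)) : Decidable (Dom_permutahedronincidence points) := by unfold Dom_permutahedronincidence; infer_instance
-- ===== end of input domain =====

-- B hash-conses the points through a dict (cell table computed on distinct points only)
-- and tests each pair by locating the first/last mismatching positions and comparing the
-- interior slice, instead of A's count-and-collect of all differences (alternative algorithm).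

-- ===== PORT A =====
-- swapdifferbyone: loop over i in range(len(pnt1)); pnt2[i] can raise IndexError, so the
-- accumulated state (cnt, lst) is threaded through Option (none = raise).
def swapdifferbyone (pnt1 pnt2 : List Int) : Option Bool :=
  let st := (PySem.List.pyRange 0 (PySem.List.len pnt1)).foldl
    (fun acc i =>
      match acc with
      | none => none
      | some (cnt, lst) =>
        match PySem.List.pyGet? pnt1 i, PySem.List.pyGet? pnt2 i with
        | some a, some b => if a ≠ b then some (cnt + 1, lst ++ [a]) else some (cnt, lst)
        | _, _ => none)
    (some ((0 : Int), ([] : List Int)))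
  match st with
  | none => none
  | some (cnt, lst) =>
    if cnt = 2 then
      -- cnt == 2 means lst has exactly two elements, so lst[0], lst[1] are exact
      some (decide (|PySem.List.pyGetD lst 0 0 - PySem.List.pyGetD lst 1 0| = 1))
    else some false

-- i, j run over range(len(points)), so points[i]/points[j] are in range: pyGetD is exact here
def permutahedronincidence (points : List (List Int)) : List (List Int) :=
  (PySem.List.pyRange 0 (PySem.List.len points)).foldl
    (fun incidence i =>
      let lst := (PySem.List.pyRange 0 (PySem.List.len points)).foldl
        (fun lst j =>
          if (swapdifferbyone (PySem.List.pyGetD points i []) (PySem.List.pyGetD points j [])).getD false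
          then lst ++ [(1 : Int)] else lst ++ [(0 : Int)])
        []
      incidence ++ [lst])
    []

-- ===== PORT B =====
-- _lcp: the while loop 'k += 1 while k < len(p) and p[k] == q[k]' as the structural
-- recursion over the two lists it walks (exact for len(q) ≥ len(p); Pre_ gives equal lengths)
def pvLCP : List Int → List Int → Nat
  | a :: p, b :: q => if a = b then pvLCP p q + 1 else 0
  | _, _ => 0

-- _cell: first mismatch i, last mismatch j (via the lcp of the reversed lists), interior
-- slice equality and the consecutive-values test; p[i]/p[j] are in range, so getD is exact
def pvCellB (p q : List Int) : Int :=
  let i := pvLCP p q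
  let n := p.length
  if i = n then 0
  else
    let j := n - 1 - pvLCP p.reverse q.reverse
    if i = j ∨ PySem.List.slice p (some ((i : Int) + 1)) (some (j : Int)) ≠
                 PySem.List.slice q (some ((i : Int) + 1)) (some (j : Int)) ∨
       |p.getD i 0 - p.getD j 0| ≠ 1
    then 0 else 1

-- the hash-consing loop: index : dict tuple→int, reps : distinct points, code : index of each point
def pvStep (st : PySem.Dict (List Int) Nat × List (List Int) × List Nat) (p : List Int) :
    PySem.Dict (List Int) Nat × List (List Int) × List Nat :=
  match PySem.Dict.get? st.1 p with
  | some k => (st.1, st.2.1, st.2.2 ++ [k])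
  | none => (PySem.Dict.insert st.1 p st.2.1.length, st.2.1 ++ [p], st.2.2 ++ [st.2.1.length])

def permutahedronincidence_alt (points : List (List Int)) : List (List Int) :=
  let st := points.foldl pvStep (PySem.Dict.empty, [], [])
  let reps := st.2.1
  let code := st.2.2
  -- table[a][b]: a, b come from code, hence are in range of reps/table: getD is exact
  let table := reps.map (fun a => reps.map (fun b => pvCellB a b))
  code.map (fun a => code.map (fun b => (table.getD a []).getD b 0))

-- ===== PRECONDITION & SPEC =====
-- A raises IndexError as soon as it compares a longer point with a shorter one, i.e.
-- exactly when not all points have the same length; Pre_ admits the equal-length inputs.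
def Pre_permutahedronincidence (points : List (List Int)) : Prop :=
  ∀ p ∈ points, ∀ q ∈ points, p.length = q.length
instance (points : List (List Int)) : Decidable (Pre_permutahedronincidence points) := by
  unfold Pre_permutahedronincidence; infer_instance

def pvWitness_permutahedronincidence : List (List Int) := [[1, 2, 3], [2, 1, 3], [1, 3, 2]]

def Spec_permutahedronincidence (points : List (List Int)) (out : List (List Int)) : Prop := out = permutahedronincidence_alt points
instance (points : List (List Int)) (out : List (List Int)) : Decidable (Spec_permutahedronincidence points out) := by unfold Spec_permutahedronincidence; infer_instance

-- ===== CLAIM (what is proved, stated in full; the proofs are below) =====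
def Claim_equal_permutahedronincidence : Prop := ∀ (points : List (List Int)), Dom_permutahedronincidence points → Pre_permutahedronincidence points → Spec_permutahedronincidence points (permutahedronincidence points)

-- ===== LEMMAS AND PROOFS =====

-- the list of differing pnt1-coordinates (positions where the two points disagree)
def pvDiffs (p q : List Int) : List Int :=
  ((p.zip q).filter (fun ab => ab.1 ≠ ab.2)).map Prod.fst

-- both programs' cell value as a function of the difference list
def pvSpec : List Int → Int
  | [a, b] => if |a - b| = 1 then 1 else 0
  | _ => 0

theorem pvDiffs_cons (a b : Int) (p q : List Int) :
    pvDiffs (a :: p) (b :: q) = if a ≠ b then a :: pvDiffs p q else pvDiffs p q := by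
  simp only [pvDiffs, List.zip_cons_cons, List.filter_cons]
  by_cases h : a = b <;> simp [h]

theorem pvDiffs_refl (p : List Int) : pvDiffs p p = [] := by
  induction p with
  | nil => rfl
  | cons a p ih => rw [pvDiffs_cons]; simp [ih]

theorem pvDiffs_append (u1 u2 v1 v2 : List Int) (h : v1.length = u1.length) :
    pvDiffs (u1 ++ u2) (v1 ++ v2) = pvDiffs u1 v1 ++ pvDiffs u2 v2 := by
  induction u1 generalizing v1 with
  | nil => cases v1 with
    | nil => simp [pvDiffs]
    | cons b v1 => simp at h
  | cons a u1 ih => cases v1 with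
    | nil => simp at h
    | cons b v1 =>
      simp only [List.length_cons, Nat.succ.injEq] at h
      simp only [List.cons_append, pvDiffs_cons, ih v1 h]
      by_cases hab : a = b <;> simp [hab]

-- A's inner loop computes (length of pvDiffs, pvDiffs) when the lengths agree
theorem pvLoopA (p : List Int) : ∀ (q : List Int), q.length = p.length →
    ∀ (i : Nat), i ≤ p.length → ∀ (cnt : Int) (lst : List Int),
    (PySem.List.pyRange (i : Int) (PySem.List.len p)).foldl
      (fun acc k =>
        match acc with
        | none => none
        | some (cnt, lst) =>
          match PySem.List.pyGet? p k, PySem.List.pyGet? q k with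
          | some a, some b => if a ≠ b then some (cnt + 1, lst ++ [a]) else some (cnt, lst)
          | _, _ => none)
      (some (cnt, lst))
    = some (cnt + (pvDiffs (p.drop i) (q.drop i)).length, lst ++ pvDiffs (p.drop i) (q.drop i)) := by
  intro q hq i hi
  induction hn : p.length - i generalizing i with
  | zero =>
      intro cnt lst
      have hie : (i : Int) = (PySem.List.len p) := by
        simp only [PySem.List.len]; exact_mod_cast (by omega : i = p.length)
      rw [hie, PySem.List.pyRange_one_eq_nil (le_refl _)]
      rw [List.drop_eq_nil_of_le (by omega : p.length ≤ i),
          List.drop_eq_nil_of_le (by omega : q.length ≤ i)]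
      simp [pvDiffs]
  | succ n ih =>
      intro cnt lst
      have hlt : i < p.length := by omega
      have hcons : PySem.List.pyRange (i : Int) (PySem.List.len p)
          = (i : Int) :: PySem.List.pyRange ((i : Int) + 1) (PySem.List.len p) := by
        apply PySem.List.pyRange_one_cons
        simp only [PySem.List.len]; exact_mod_cast hlt
      have hqlt : i < q.length := by omega
      have hp : PySem.List.pyGet? p (i : Int) = some p[i] := by
        simp [hlt]
      have hq2 : PySem.List.pyGet? q (i : Int) = some q[i] := by
        simp [hqlt]
      have hdropp : p.drop i = p[i] :: p.drop (i + 1) := List.drop_eq_getElem_cons hlt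
      have hdropq : q.drop i = q[i] :: q.drop (i + 1) := List.drop_eq_getElem_cons hqlt
      have hcast : ((i : Int) + 1) = ((i + 1 : Nat) : Int) := by push_cast; ring
      rw [hcons, List.foldl_cons, hp, hq2]
      by_cases hab : p[i] = (q[i] : Int)
      · simp only [hab, ne_eq, not_true_eq_false, ite_false]
        rw [hcast, ih (i + 1) (by omega) (by omega)]
        rw [hdropp, hdropq, pvDiffs_cons]
        simp [hab]
      · simp only [ne_eq, hab, not_false_eq_true, ite_true]
        rw [hcast, ih (i + 1) (by omega) (by omega)]
        rw [hdropp, hdropq, pvDiffs_cons]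
        simp only [ne_eq, hab, not_false_eq_true, ite_true]
        refine congrArg some (Prod.ext ?_ ?_)
        · simp only [List.length_cons]; push_cast; ring
        · simp

-- the final test of A, written on an arbitrary difference list, equals pvSpec
theorem pvSpec_char (d : List Int) :
    (if (if (d.length : Int) = 2
          then some (decide (|PySem.List.pyGetD d 0 0 - PySem.List.pyGetD d 1 0| = 1))
          else some false).getD false = true then (1 : Int) else 0)
    = pvSpec d := by
  rcases d with _ | ⟨a, _ | ⟨b, _ | ⟨c, t⟩⟩⟩ <;>
    simp [pvSpec, PySem.List.pyGetD, PySem.List.pyIdx?, PySem.List.pyGet?] <;>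
    first
      | omega
      | (split <;> first | (exfalso; omega) | simp_all)

-- A's per-pair entry equals pvSpec of the difference list (equal-length points)
theorem aEntry_eq (p q : List Int) (h : q.length = p.length) :
    (if (swapdifferbyone p q).getD false then (1 : Int) else 0) = pvSpec (pvDiffs p q) := by
  have hloop := pvLoopA p q h 0 (by omega) 0 []
  unfold swapdifferbyone
  rw [show ((0 : Nat) : Int) = (0 : Int) from rfl] at hloop
  rw [hloop]
  simp only [List.drop_zero, List.nil_append, Int.zero_add]
  exact pvSpec_char (pvDiffs p q)

-- pvLCP: first-mismatch characterisation (length-bounded; take-prefix equal; mismatch at i)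
theorem pvLCP_spec (p : List Int) : ∀ (q : List Int), q.length = p.length →
    pvLCP p q ≤ p.length ∧ p.take (pvLCP p q) = q.take (pvLCP p q) ∧
    (pvLCP p q < p.length → p.getD (pvLCP p q) 0 ≠ q.getD (pvLCP p q) 0) ∧
    (pvLCP p q = p.length → p = q) := by
  induction p with
  | nil =>
      intro q h
      simp only [List.length_nil, List.length_eq_zero_iff] at h; subst h
      simp [pvLCP]
  | cons a p ih =>
      intro q h
      cases q with
      | nil => simp at h
      | cons b q =>
        simp only [List.length_cons, Nat.succ.injEq] at h
        obtain ⟨h1, h2, h3, h4⟩ := ih q h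
        by_cases hab : a = b
        · subst hab
          have hl : pvLCP (a :: p) (a :: q) = pvLCP p q + 1 := by simp [pvLCP]
          rw [hl]
          refine ⟨by simpa using h1, by simpa using h2, ?_, ?_⟩
          · intro hlt
            simpa using h3 (by simpa using hlt)
          · intro he; simp only [List.length_cons] at he
            have := h4 (by omega); simp [this]
        · have hl : pvLCP (a :: p) (b :: q) = 0 := by simp [pvLCP, hab]
          rw [hl]
          exact ⟨by simp, by simp, fun _ => by simpa using hab, by simp⟩

theorem pvSpec_len_ne_two (d : List Int) (h : d.length ≠ 2) : pvSpec d = 0 := by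
  rcases d with _ | ⟨a, _ | ⟨b, _ | ⟨c, t⟩⟩⟩ <;> simp_all [pvSpec]

theorem pvDiffs_eq_nil (u : List Int) : ∀ (v : List Int), v.length = u.length →
    pvDiffs u v = [] → u = v := by
  induction u with
  | nil => intro v hv _; simp only [List.length_nil, List.length_eq_zero_iff] at hv; rw [hv]
  | cons a u ih =>
      intro v hv hd
      cases v with
      | nil => simp at hv
      | cons b v =>
        simp only [List.length_cons, Nat.succ.injEq] at hv
        rw [pvDiffs_cons] at hd
        by_cases hab : a = b
        · rw [if_neg (by simpa using hab)] at hd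
          rw [hab, ih v hv hd]
        · rw [if_pos (by simpa using hab)] at hd; simp at hd

-- the difference list of two equal-length points whose mismatches lie between i and j
theorem pvDiffs_split (p q : List Int) (h : q.length = p.length) (i j : Nat)
    (hij : i ≤ j) (hj : j < p.length)
    (hpre : p.take i = q.take i) (hsuf : p.drop (j + 1) = q.drop (j + 1))
    (hi : p.getD i 0 ≠ q.getD i 0) (hjne : p.getD j 0 ≠ q.getD j 0) :
    pvDiffs p q = if i = j then [p.getD i 0]
      else p.getD i 0 :: (pvDiffs ((p.drop (i + 1)).take (j - (i + 1)))
             ((q.drop (i + 1)).take (j - (i + 1))) ++ [p.getD j 0]) := by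
  have hilt : i < p.length := by omega
  have hqi : i < q.length := by omega
  have hqj : j < q.length := by omega
  have hi' : p[i] ≠ q[i] := by
    rwa [List.getD_eq_getElem _ _ hilt, List.getD_eq_getElem _ _ hqi] at hi
  have hj' : p[j] ≠ q[j] := by
    rwa [List.getD_eq_getElem _ _ hj, List.getD_eq_getElem _ _ hqj] at hjne
  have hstep1 : pvDiffs p q = p[i] :: pvDiffs (p.drop (i + 1)) (q.drop (i + 1)) := by
    conv_lhs => rw [← List.take_append_drop i p, ← List.take_append_drop i q]
    rw [pvDiffs_append _ _ _ _ (by simp [h]), hpre, pvDiffs_refl, List.nil_append,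
        List.drop_eq_getElem_cons hilt, List.drop_eq_getElem_cons hqi, pvDiffs_cons,
        if_pos (by simpa using hi')]
  by_cases hieq : i = j
  · subst hieq
    rw [if_pos rfl, hstep1, hsuf, pvDiffs_refl, List.getD_eq_getElem _ _ hilt]
  · have hilj : i < j := by omega
    rw [if_neg hieq, hstep1]
    have hsplit_p : p.drop (i + 1)
        = (p.drop (i + 1)).take (j - (i + 1)) ++ (p[j] :: p.drop (j + 1)) := by
      conv_lhs => rw [← List.take_append_drop (j - (i + 1)) (p.drop (i + 1))]
      rw [List.drop_drop, (by omega : (i + 1) + (j - (i + 1)) = j),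
          List.drop_eq_getElem_cons hj]
    have hsplit_q : q.drop (i + 1)
        = (q.drop (i + 1)).take (j - (i + 1)) ++ (q[j] :: q.drop (j + 1)) := by
      conv_lhs => rw [← List.take_append_drop (j - (i + 1)) (q.drop (i + 1))]
      rw [List.drop_drop, (by omega : (i + 1) + (j - (i + 1)) = j),
          List.drop_eq_getElem_cons hqj]
    have e : pvDiffs (p.drop (i + 1)) (q.drop (i + 1))
        = pvDiffs ((p.drop (i + 1)).take (j - (i + 1))) ((q.drop (i + 1)).take (j - (i + 1)))
            ++ [p[j]] := by
      conv_lhs => rw [hsplit_p, hsplit_q]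
      rw [pvDiffs_append _ _ _ _ (by simp [h]), pvDiffs_cons, if_pos (by simpa using hj'),
          hsuf, pvDiffs_refl]
    rw [e, List.getD_eq_getElem _ _ hilt, List.getD_eq_getElem _ _ hj]

-- B's per-pair entry equals pvSpec of the difference list (equal-length points)
theorem bCell_eq (p q : List Int) (h : q.length = p.length) :
    pvCellB p q = pvSpec (pvDiffs p q) := by
  obtain ⟨hi_le, htake, hne, heq⟩ := pvLCP_spec p q h
  simp only [pvCellB]
  by_cases hin : pvLCP p q = p.length
  · rw [if_pos hin, heq hin, pvDiffs_refl]; rfl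
  · rw [if_neg hin]
    have hilt : pvLCP p q < p.length := lt_of_le_of_ne hi_le hin
    have hpne : p ≠ q := fun he => hne hilt (by rw [he])
    have hrl : q.reverse.length = p.reverse.length := by simpa using h
    obtain ⟨hr_le, hrtake, hrne, hreq⟩ := pvLCP_spec p.reverse q.reverse hrl
    have hrlt : pvLCP p.reverse q.reverse < p.length := by
      rcases lt_or_eq_of_le hr_le with hlt | heq2
      · simpa using hlt
      · exact absurd (List.reverse_injective (hreq heq2)) hpne
    -- abbreviations
    set i := pvLCP p q with hidef
    set r := pvLCP p.reverse q.reverse with hrdef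
    set j := p.length - 1 - r with hjdef
    have hjlt : j < p.length := by omega
    -- the mismatches lie between i and j
    have hdropsuf : p.drop (j + 1) = q.drop (j + 1) := by
      have h1 : (p.drop (j + 1)).reverse = p.reverse.take r := by
        rw [List.reverse_drop, (by omega : p.length - (j + 1) = r)]
      have h2 : (q.drop (j + 1)).reverse = q.reverse.take r := by
        rw [List.reverse_drop, (by omega : q.length - (j + 1) = r)]
      exact List.reverse_injective (h1.trans (hrtake.trans h2.symm))
    have hne_j : p.getD j 0 ≠ q.getD j 0 := by
      have hrb : r < p.reverse.length := by simpa using hrlt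
      have hqb : r < q.reverse.length := by simp; omega
      have := hrne hrb
      rw [List.getD_eq_getElem _ _ hrb, List.getD_eq_getElem _ _ hqb,
          List.getElem_reverse, List.getElem_reverse] at this
      rw [List.getD_eq_getElem _ _ hjlt, List.getD_eq_getElem _ _ (by omega : j < q.length)]
      intro he; apply this
      have e1 : p.length - 1 - r = j := by omega
      have e2 : q.length - 1 - r = j := by omega
      simp only [e1, e2]
      exact he
    have hij : i ≤ j := by
      by_contra hgt
      push_neg at hgt
      apply hne hilt
      have e : p[i]? = q[i]? := by
        have e0 : (p.drop (j + 1))[i - (j + 1)]? = (q.drop (j + 1))[i - (j + 1)]? := by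
          rw [hdropsuf]
        rwa [List.getElem?_drop, List.getElem?_drop,
             (by omega : (j + 1) + (i - (j + 1)) = i)] at e0
      rw [List.getD_eq_getElem?_getD, List.getD_eq_getElem?_getD, e]
    have hsplit := pvDiffs_split p q h i j hij hjlt htake hdropsuf (hne hilt) hne_j
    have hslice_p : PySem.List.slice p (some ((i : Int) + 1)) (some (j : Int))
        = (p.drop (i + 1)).take (j - (i + 1)) := by
      rw [(by push_cast; ring : ((i : Int) + 1) = ((i + 1 : Nat) : Int)),
          PySem.List.slice_natCast]
    have hslice_q : PySem.List.slice q (some ((i : Int) + 1)) (some (j : Int))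
        = (q.drop (i + 1)).take (j - (i + 1)) := by
      rw [(by push_cast; ring : ((i : Int) + 1) = ((i + 1 : Nat) : Int)),
          PySem.List.slice_natCast]
    rw [hslice_p, hslice_q, hsplit]
    by_cases hieq : i = j
    · rw [if_pos hieq, if_pos (Or.inl hieq)]; rfl
    · rw [if_neg hieq]
      have hmlen : ((q.drop (i + 1)).take (j - (i + 1))).length
          = ((p.drop (i + 1)).take (j - (i + 1))).length := by simp [h]
      by_cases hmid : (p.drop (i + 1)).take (j - (i + 1)) = (q.drop (i + 1)).take (j - (i + 1))
      · have hnil : pvDiffs ((p.drop (i + 1)).take (j - (i + 1)))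
            ((q.drop (i + 1)).take (j - (i + 1))) = [] := by rw [hmid, pvDiffs_refl]
        rw [hnil, List.nil_append]
        by_cases habs : |p.getD i 0 - p.getD j 0| = 1
        · have hcond : ¬(i = j ∨
              (p.drop (i + 1)).take (j - (i + 1)) ≠ (q.drop (i + 1)).take (j - (i + 1)) ∨
              |p.getD i 0 - p.getD j 0| ≠ 1) := by
            rintro (h1 | h2 | h3)
            · exact hieq h1
            · exact h2 hmid
            · exact h3 habs
          rw [if_neg hcond]
          simp only [pvSpec]
          rw [if_pos habs]
        · rw [if_pos (Or.inr (Or.inr habs))]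
          simp only [pvSpec]
          rw [if_neg habs]
      · have hnn : pvDiffs ((p.drop (i + 1)).take (j - (i + 1)))
            ((q.drop (i + 1)).take (j - (i + 1))) ≠ [] := by
          intro hnil; exact hmid (pvDiffs_eq_nil _ _ hmlen hnil)
        rw [if_pos (Or.inr (Or.inl hmid)), pvSpec_len_ne_two]
        simp only [List.length_cons, List.length_append, List.length_cons, List.length_nil]
        have := List.length_pos_iff.mpr hnn
        omega

-- A's matrix, unconditionally, as a map of its per-pair entry
theorem A_matrix (points : List (List Int)) :
    permutahedronincidence points
    = points.map (fun p => points.map (fun q =>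
        if (swapdifferbyone p q).getD false then (1 : Int) else 0)) := by
  unfold permutahedronincidence
  have houter := PySem.List.foldl_pyRange_pyGetD points ([] : List Int)
    (fun incidence p =>
      incidence ++ [(PySem.List.pyRange 0 (PySem.List.len points)).foldl
        (fun lst j =>
          if (swapdifferbyone p (PySem.List.pyGetD points j [])).getD false
          then lst ++ [(1 : Int)] else lst ++ [(0 : Int)]) []])
    ([] : List (List Int)) (a := 0) (by omega)
  simp only [Int.toNat_zero, List.drop_zero] at houter
  rw [houter]
  have hinner : ∀ p : List Int,
      (PySem.List.pyRange 0 (PySem.List.len points)).foldl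
        (fun lst j =>
          if (swapdifferbyone p (PySem.List.pyGetD points j [])).getD false
          then lst ++ [(1 : Int)] else lst ++ [(0 : Int)]) []
      = points.map (fun q => if (swapdifferbyone p q).getD false then (1 : Int) else 0) := by
    intro p
    have h1 := PySem.List.foldl_pyRange_pyGetD points ([] : List Int)
      (fun lst q => if (swapdifferbyone p q).getD false then lst ++ [(1 : Int)] else lst ++ [(0 : Int)])
      ([] : List Int) (a := 0) (by omega)
    simp only [Int.toNat_zero, List.drop_zero] at h1
    rw [h1]
    have h2 : (fun (lst : List Int) (q : List Int) =>
        if (swapdifferbyone p q).getD false then lst ++ [(1 : Int)] else lst ++ [(0 : Int)])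
        = fun lst q => lst ++ [if (swapdifferbyone p q).getD false then (1 : Int) else 0] := by
      funext lst q; split <;> rfl
    rw [h2, PySem.List.foldl_append_singleton_eq_map]
    simp
  have h3 : (fun (acc : List (List Int)) (p : List Int) =>
      acc ++ [(PySem.List.pyRange 0 (PySem.List.len points)).foldl
        (fun lst j =>
          if (swapdifferbyone p (PySem.List.pyGetD points j [])).getD false
          then lst ++ [(1 : Int)] else lst ++ [(0 : Int)]) []])
      = fun acc p => acc ++ [points.map (fun q => if (swapdifferbyone p q).getD false then (1 : Int) else 0)] := by
    funext acc p; rw [hinner p]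
  rw [h3, PySem.List.foldl_append_singleton_eq_map]
  simp

-- the hash-consing fold invariant
theorem pvIndex_inv (ps : List (List Int)) :
    ∀ (index : PySem.Dict (List Int) Nat) (reps : List (List Int)) (code : List Nat),
    (∀ t k, PySem.Dict.get? index t = some k → k < reps.length ∧ reps.getD k [] = t) →
    (∀ k ∈ code, k < reps.length) →
    (∃ ext, (ps.foldl pvStep (index, reps, code)).2.1 = reps ++ ext) ∧
    (∀ k ∈ (ps.foldl pvStep (index, reps, code)).2.2,
        k < (ps.foldl pvStep (index, reps, code)).2.1.length) ∧
    (ps.foldl pvStep (index, reps, code)).2.2.map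
        (fun k => (ps.foldl pvStep (index, reps, code)).2.1.getD k [])
      = code.map (fun k => (ps.foldl pvStep (index, reps, code)).2.1.getD k []) ++ ps := by
  induction ps with
  | nil => intro index reps code _ hc; exact ⟨⟨[], by simp⟩, by simpa using hc, by simp⟩
  | cons p ps ih =>
      intro index reps code hinv hc
      simp only [List.foldl_cons]
      cases hget : PySem.Dict.get? index p with
      | some k =>
          have hk := hinv p k hget
          have hstep : pvStep (index, reps, code) p = (index, reps, code ++ [k]) := by
            simp [pvStep, hget]
          rw [hstep]
          obtain ⟨⟨ext, hext⟩, hb, hm⟩ := ih index reps (code ++ [k]) hinv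
            (by intro x hx; rcases List.mem_append.1 hx with h | h
                · exact hc x h
                · simp at h; omega)
          refine ⟨⟨ext, hext⟩, hb, ?_⟩
          rw [hm, List.map_append]
          have : (ps.foldl pvStep (index, reps, code ++ [k])).2.1.getD k [] = p := by
            rw [hext, List.getD_append _ _ _ _ hk.1, hk.2]
          simp only [List.map_cons, List.map_nil]
          rw [this]
          simp
      | none =>
          have hstep : pvStep (index, reps, code) p
              = (PySem.Dict.insert index p reps.length, reps ++ [p], code ++ [reps.length]) := by
            simp [pvStep, hget]
          rw [hstep]
          have hinv' : ∀ t k, PySem.Dict.get? (PySem.Dict.insert index p reps.length) t = some k →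
              k < (reps ++ [p]).length ∧ (reps ++ [p]).getD k [] = t := by
            intro t k hg
            by_cases ht : t = p
            · subst ht
              rw [PySem.Dict.get?_insert_self] at hg
              cases hg
              constructor
              · simp
              · rw [List.getD_eq_getElem _ _ (by simp)]
                simp
            · rw [PySem.Dict.get?_insert_of_ne index _ ht] at hg
              have := hinv t k hg
              refine ⟨by simp; omega, ?_⟩
              rw [List.getD_append _ _ _ _ this.1, this.2]
          have hc' : ∀ k ∈ code ++ [reps.length], k < (reps ++ [p]).length := by
            intro x hx; rcases List.mem_append.1 hx with h | h
            · have := hc x h; simp; omega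
            · simp at h; simp; omega
          obtain ⟨⟨ext, hext⟩, hb, hm⟩ := ih _ _ _ hinv' hc'
          refine ⟨⟨[p] ++ ext, by rw [hext]; simp⟩, hb, ?_⟩
          rw [hm, List.map_append]
          have : (ps.foldl pvStep (PySem.Dict.insert index p reps.length, reps ++ [p],
              code ++ [reps.length])).2.1.getD reps.length [] = p := by
            rw [hext, List.getD_append _ _ _ _ (by simp), List.getD_eq_getElem _ _ (by simp)]
            simp
          simp only [List.map_cons, List.map_nil]
          rw [this]
          simp

-- B's matrix, unconditionally, as a map of its per-pair entry
theorem B_matrix (points : List (List Int)) :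
    permutahedronincidence_alt points
    = points.map (fun p => points.map (fun q => pvCellB p q)) := by
  unfold permutahedronincidence_alt
  obtain ⟨⟨ext, -⟩, hb, hm⟩ := pvIndex_inv points PySem.Dict.empty [] []
    (by intro t k hg; simp [PySem.Dict.get?, PySem.Dict.empty] at hg)
    (by intro k hk; simp at hk)
  set st := points.foldl pvStep (PySem.Dict.empty, [], []) with hst
  simp only [List.map_nil, List.nil_append] at hm
  -- each table lookup is the cell of the coded representatives
  have hcell : ∀ a ∈ st.2.2, ∀ b ∈ st.2.2,
      ((st.2.1.map (fun x => st.2.1.map (fun y => pvCellB x y))).getD a []).getD b 0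
      = pvCellB (st.2.1.getD a []) (st.2.1.getD b []) := by
    intro a ha b hb2
    have ha' := hb a ha
    have hb' := hb b hb2
    simp only [List.getD_eq_getElem?_getD, List.getElem?_map, List.getElem?_eq_getElem ha',
      List.getElem?_eq_getElem hb', Option.map_some, Option.getD_some]
  calc st.2.2.map (fun a => st.2.2.map (fun b =>
          ((st.2.1.map (fun x => st.2.1.map (fun y => pvCellB x y))).getD a []).getD b 0))
      = st.2.2.map (fun a => st.2.2.map (fun b =>
          pvCellB (st.2.1.getD a []) (st.2.1.getD b []))) := by
        refine List.map_congr_left (fun a ha => List.map_congr_left (fun b hb2 => ?_))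
        exact hcell a ha b hb2
    _ = st.2.2.map (fun a => (st.2.2.map (fun k => st.2.1.getD k [])).map
          (fun q => pvCellB (st.2.1.getD a []) q)) := by
        simp [List.map_map, Function.comp]
    _ = (st.2.2.map (fun k => st.2.1.getD k [])).map
          (fun p => (st.2.2.map (fun k => st.2.1.getD k [])).map (fun q => pvCellB p q)) := by
        simp [List.map_map, Function.comp]
    _ = points.map (fun p => points.map (fun q => pvCellB p q)) := by rw [hm]

-- ===== VERDICT (by name: the statement is the Claim_ definition above) =====
theorem permutahedronincidence_spec : Claim_equal_permutahedronincidence := by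
  intro points _ hpre
  show permutahedronincidence points = permutahedronincidence_alt points
  rw [A_matrix, B_matrix]
  refine List.map_congr_left (fun p hp => List.map_congr_left (fun q hq => ?_))
  rw [aEntry_eq p q (hpre q hq p hp), bCell_eq p q (hpre q hq p hp)]
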